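-- pv_equiv track=rewrite | github.com/ermiyastesfaye-lab/A2SV_CP | A2SV G6 - Round #3 10-Mar-2025/F - Binary Substrings with Exactly k Ones 300526.py | BinarySubstring
-- ===== SOURCE A (Python) =====
-- def BinarySubstring(k, s):
--     left = 0
--     left2 = 0
--     ans = 0
--     ans2 = 0
--     cnt1 = 0
--     cnt2 = 0
--     for right in range(len(s)):
--             if s[right] == "1":
--                 cnt1 += 1
--                 cnt2+=1
--             while left2 <= right and cnt2 > k-1:
--                 if s[left2] == "1":
--                     cnt2-=1
--                 left2 += 1
--             ans2 += right - left2 + 1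
--             while left <= right and cnt1 > k:
--                 if s[left] == "1":
--                     cnt1-=1
--                 left+=1
--             ans += right - left + 1
--     return ans - ans2
-- ===== SOURCE B (Python) =====
-- def BinarySubstring(k, s):
--     count = {0: 1}
--     pref = 0
--     ans = 0
--     for ch in s:
--         if ch == "1":
--             pref += 1
--         ans += count.get(pref - k, 0)
--         count[pref] = count.get(pref, 0) + 1
--     return ans
-- ===== Notes on version B (the rewrite author's own statement) =====
-- stated objective: alternative
-- what changed: Replaced the two synchronized sliding windows (at-most-k minus at-most-(k-1)) by a single pass that counts prefix one-counts in a dictionary and looks up pref-k at each step.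
import Mathlib
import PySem

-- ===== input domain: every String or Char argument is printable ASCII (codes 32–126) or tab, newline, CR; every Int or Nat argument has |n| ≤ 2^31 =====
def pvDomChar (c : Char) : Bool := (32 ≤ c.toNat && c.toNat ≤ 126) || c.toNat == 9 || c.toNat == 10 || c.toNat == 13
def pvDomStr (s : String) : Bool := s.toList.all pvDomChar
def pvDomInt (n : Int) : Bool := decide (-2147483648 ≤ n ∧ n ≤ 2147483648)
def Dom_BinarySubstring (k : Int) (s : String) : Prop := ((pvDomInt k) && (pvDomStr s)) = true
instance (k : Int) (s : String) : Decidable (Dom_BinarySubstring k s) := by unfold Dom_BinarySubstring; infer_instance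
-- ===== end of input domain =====

-- B replaces A's two synchronized sliding windows (at-most-k minus at-most-(k-1)) by a single
-- pass with a dictionary of prefix one-counts (objective: alternative algorithm, same O(n) cost).

-- ===== PORT A =====
-- A's inner `while` loops (both have the same shape): advance `left` while left ≤ right and cnt > t.
def shrink (cs : List Char) (right : Nat) (t : Int) (left : Nat) (cnt : Int) : Nat × Int :=
  if left ≤ right ∧ cnt > t then
    shrink cs right t (left + 1) (if cs.getD left ' ' = '1' then cnt - 1 else cnt)
  else (left, cnt)
termination_by right + 1 - left
decreasing_by omega

-- the body of A's `for right in range(len(s))` loop; state = (left, left2, ans, ans2, cnt1, cnt2)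
def stepA (cs : List Char) (k : Int) :
    (Nat × Nat × Int × Int × Int × Int) → Nat → (Nat × Nat × Int × Int × Int × Int)
  | (left, left2, ans, ans2, cnt1, cnt2), right =>
    let cnt1 := if cs.getD right ' ' = '1' then cnt1 + 1 else cnt1
    let cnt2 := if cs.getD right ' ' = '1' then cnt2 + 1 else cnt2
    let p2 := shrink cs right (k - 1) left2 cnt2
    let p1 := shrink cs right k left cnt1
    (p1.1, p2.1, ans + (right : Int) - p1.1 + 1, ans2 + (right : Int) - p2.1 + 1, p1.2, p2.2)

def BinarySubstring (k : Int) (s : String) : Int :=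
  let cs := s.toList
  let st := (List.range cs.length).foldl (stepA cs k) (0, 0, 0, 0, 0, 0)
  st.2.2.1 - st.2.2.2.1

-- ===== PORT B =====
-- the body of B's `for ch in s` loop; state = (count, pref, ans)
def stepB (k : Int) : (PySem.Dict Int Int × Int × Int) → Char → (PySem.Dict Int Int × Int × Int)
  | (count, pref, ans), ch =>
    let pref := if ch = '1' then pref + 1 else pref
    let ans := ans + count.getD (pref - k) 0
    (count.insert pref (count.getD pref 0 + 1), pref, ans)

def BinarySubstring_alt (k : Int) (s : String) : Int :=
  (s.toList.foldl (stepB k) (PySem.Dict.empty.insert 0 1, 0, 0)).2.2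

-- ===== PRECONDITION & SPEC =====
def Spec_BinarySubstring (k : Int) (s : String) (out : Int) : Prop := out = BinarySubstring_alt k s
instance (k : Int) (s : String) (out : Int) : Decidable (Spec_BinarySubstring k s out) := by unfold Spec_BinarySubstring; infer_instance

-- ===== CLAIM (what is proved, stated in full; the proofs are below) =====
def Claim_equal_BinarySubstring : Prop := ∀ (k : Int) (s : String), Dom_BinarySubstring k s → Spec_BinarySubstring k s (BinarySubstring k s)

-- ===== LEMMAS AND PROOFS =====
def ones (cs : List Char) (i : Nat) : Nat := (cs.take i).countP (· = '1')
lemma ones_mono (cs : List Char) {i j : Nat} (h : i ≤ j) : ones cs i ≤ ones cs j := by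
  unfold ones
  have h1 : cs.take i = (cs.take j).take i := by rw [List.take_take]; congr 1; omega
  rw [h1]; exact (List.take_sublist _ _).countP_le
lemma ones_zero (cs : List Char) : ones cs 0 = 0 := rfl
lemma ones_succ (cs : List Char) {i : Nat} (h : i < cs.length) :
    ones cs (i + 1) = ones cs i + (if cs.getD i ' ' = '1' then 1 else 0) := by
  unfold ones
  rw [List.take_add_one, List.getElem?_eq_getElem h, Option.toList_some, List.countP_append]
  simp [List.getD, List.getElem?_eq_getElem h, List.countP_cons]
def InvWin (cs : List Char) (m : Nat) (t : Int) (left : Nat) (cnt : Int) : Prop :=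
  left ≤ m ∧ cnt = (ones cs m : Int) - ones cs left ∧ (cnt ≤ t ∨ left = m) ∧
    ∀ l < left, (ones cs m : Int) - ones cs l > t
lemma shrink_spec (cs : List Char) (i : Nat) (hi : i < cs.length) (t : Int) :
    ∀ left cnt, left ≤ i + 1 → cnt = (ones cs (i + 1) : Int) - ones cs left →
    (∀ l < left, (ones cs (i + 1) : Int) - ones cs l > t) →
    InvWin cs (i + 1) t (shrink cs i t left cnt).1 (shrink cs i t left cnt).2 := by
  intro left cnt h1 h2 h3
  induction left, cnt using shrink.induct cs i t with
  | case1 left cnt hc ih =>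
    rw [shrink, if_pos hc]
    apply ih
    · omega
    · have hl : left < cs.length := by omega
      have hs := ones_succ cs hl
      rcases eq_or_ne (cs.getD left ' ') '1' with hch | hch
      · rw [if_pos hch] at hs
        rw [dif_pos hch]
        omega
      · rw [if_neg hch] at hs
        rw [dif_neg hch]
        omega
    · intro l hl
      rcases Nat.lt_succ_iff_lt_or_eq.mp hl with h | h
      · exact h3 l h
      · subst h; omega
  | case2 left cnt hc =>
    rw [shrink, if_neg hc]
    refine ⟨h1, h2, ?_, h3⟩
    omega
def cntEq (cs : List Char) : Nat → Int → Int
  | 0, c => if c = 0 then 1 else 0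
  | i + 1, c => cntEq cs i c + (if ((ones cs (i + 1) : Int)) = c then 1 else 0)

lemma cntEq_interval (cs : List Char) :
    ∀ (i a b : Nat) (c : Int), a ≤ b → b ≤ i + 1 →
    (∀ l ≤ i, (((ones cs l : Int) = c) ↔ (a ≤ l ∧ l < b))) →
    cntEq cs i c = (b : Int) - a := by
  intro i
  induction i with
  | zero =>
    intro a b c hab hb hiff
    have h0 := hiff 0 le_rfl
    simp only [cntEq]
    rcases eq_or_ne (c : Int) 0 with hc | hc
    · have : a = 0 ∧ b = 1 := by
        have := h0.mp (by simp [ones_zero, hc])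
        omega
      rw [if_pos hc, this.1, this.2]; omega
    · have hn : ¬ (a ≤ 0 ∧ 0 < b) := by
        intro h
        have := h0.mpr h
        rw [ones_zero] at this
        exact hc this.symm
      have hba : b = a := by omega
      rw [if_neg hc, hba]; omega
  | succ i ih =>
    intro a b c hab hb hiff
    simp only [cntEq]
    rcases eq_or_ne ((ones cs (i + 1) : Int)) c with hc | hc
    · have hib : a ≤ i + 1 ∧ i + 1 < b := (hiff (i + 1) le_rfl).mp hc
      have hb2 : b = i + 2 := by omega
      have := ih a (i + 1) c (by omega) (by omega) ?_
      · rw [this, if_pos hc]; omega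
      · intro l hl
        rw [hiff l (by omega)]
        omega
    · have hni : ¬ (a ≤ i + 1 ∧ i + 1 < b) := fun h => hc ((hiff (i + 1) le_rfl).mpr h)
      by_cases ha : a ≤ i + 1
      · have hb2 : b ≤ i + 1 := by omega
        have := ih a b c hab hb2 ?_
        · rw [this, if_neg hc]; omega
        · intro l hl; exact hiff l (by omega)
      · -- a = i + 2 = b
        have : a = i + 2 ∧ b = i + 2 := by omega
        have := ih 0 0 c (le_rfl) (by omega) ?_
        · rw [this, if_neg hc]; omega
        · intro l hl
          rw [hiff l (by omega)]
          omega

lemma left_le_left2 (cs : List Char) (m : Nat) (k : Int) {left left2 : Nat} {cnt cnt2 : Int}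
    (h1 : InvWin cs m k left cnt) (h2 : InvWin cs m (k - 1) left2 cnt2) : left ≤ left2 := by
  obtain ⟨hL, hC, hD, hM⟩ := h1
  obtain ⟨hL2, hC2, hD2, hM2⟩ := h2
  by_contra hlt
  have hlt2 : left2 < left := by omega
  have hg := hM left2 hlt2
  have hne : left2 ≠ m := by omega
  have : cnt2 ≤ k - 1 := hD2.resolve_right hne
  omega

lemma interval_iff (cs : List Char) (m : Nat) (k : Int) {left left2 : Nat} {cnt cnt2 : Int}
    (h1 : InvWin cs m k left cnt) (h2 : InvWin cs m (k - 1) left2 cnt2) :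
    ∀ l < m, (((ones cs l : Int) = (ones cs m : Int) - k) ↔ (left ≤ l ∧ l < left2)) := by
  obtain ⟨hL, hC, hD, hM⟩ := h1
  obtain ⟨hL2, hC2, hD2, hM2⟩ := h2
  intro l hl
  constructor
  · intro hv
    constructor
    · by_contra hlt
      have hlt2 : l < left := by omega
      have := hM l hlt2
      omega
    · by_contra hge
      have hge2 : left2 ≤ l := by omega
      have hne : left2 ≠ m := by omega
      have hcle : cnt2 ≤ k - 1 := hD2.resolve_right hne
      have := ones_mono cs hge2
      omega
  · intro ⟨ha, hb⟩
    have hne : left ≠ m := by omega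
    have hcle : cnt ≤ k := hD.resolve_right hne
    have hmono := ones_mono cs ha
    have hgt := hM2 l hb
    omega

lemma exact_count (cs : List Char) (i : Nat) (k : Int) {left left2 : Nat} {cnt cnt2 : Int}
    (h1 : InvWin cs (i + 1) k left cnt) (h2 : InvWin cs (i + 1) (k - 1) left2 cnt2) :
    (left2 : Int) - left = cntEq cs i ((ones cs (i + 1) : Int) - k) := by
  have hiff := interval_iff cs (i + 1) k h1 h2
  have hab := left_le_left2 cs (i + 1) k h1 h2
  rw [cntEq_interval cs i left left2 _ hab h2.1 (fun l hl => hiff l (by omega))]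

lemma main_inv (cs : List Char) (k : Int) :
    ∀ i, i ≤ cs.length →
    (InvWin cs i k
        ((List.range i).foldl (stepA cs k) (0, 0, 0, 0, 0, 0)).1
        ((List.range i).foldl (stepA cs k) (0, 0, 0, 0, 0, 0)).2.2.2.2.1) ∧
    (InvWin cs i (k - 1)
        ((List.range i).foldl (stepA cs k) (0, 0, 0, 0, 0, 0)).2.1
        ((List.range i).foldl (stepA cs k) (0, 0, 0, 0, 0, 0)).2.2.2.2.2) ∧
    ((cs.take i).foldl (stepB k) (PySem.Dict.empty.insert 0 1, 0, 0)).2.1 = (ones cs i : Int) ∧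
    (∀ c, ((cs.take i).foldl (stepB k) (PySem.Dict.empty.insert 0 1, 0, 0)).1.getD c 0
        = cntEq cs i c) ∧
    ((List.range i).foldl (stepA cs k) (0, 0, 0, 0, 0, 0)).2.2.1
      - ((List.range i).foldl (stepA cs k) (0, 0, 0, 0, 0, 0)).2.2.2.1
      = ((cs.take i).foldl (stepB k) (PySem.Dict.empty.insert 0 1, 0, 0)).2.2 := by
  intro i
  induction i with
  | zero =>
    intro _
    simp only [List.range_zero, List.take_zero, List.foldl_nil]
    refine ⟨⟨le_rfl, by simp [ones_zero], Or.inr rfl, by omega⟩,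
            ⟨le_rfl, by simp [ones_zero], Or.inr rfl, by omega⟩, by simp [ones_zero], ?_, by simp⟩
    intro c
    simp only [cntEq]
    rw [PySem.Dict.getD_insert]
    rcases eq_or_ne c 0 with h | h
    · simp [h]
    · simp [h, PySem.Dict.getD_empty]
  | succ i ih =>
    intro hi
    have hilt : i < cs.length := by omega
    obtain ⟨hA1, hA2, hpr, hdict, hans⟩ := ih (by omega)
    obtain ⟨hL1, hC1, hD1, hM1⟩ := hA1
    obtain ⟨hL2, hC2, hD2, hM2⟩ := hA2
    rcases hsa : (List.range i).foldl (stepA cs k) (0, 0, 0, 0, 0, 0) with ⟨l1, l2, a1, a2, c1, c2⟩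
    rcases hsb : (cs.take i).foldl (stepB k) (PySem.Dict.empty.insert 0 1, 0, 0) with ⟨d, pr, ab⟩
    rw [hsa] at hL1 hC1 hD1 hM1 hL2 hC2 hD2 hM2 hans
    rw [hsb] at hpr hdict hans
    simp only at hL1 hC1 hD1 hM1 hL2 hC2 hD2 hM2 hpr hdict hans
    have hstepA : (List.range (i + 1)).foldl (stepA cs k) (0, 0, 0, 0, 0, 0)
        = stepA cs k (l1, l2, a1, a2, c1, c2) i := by
      rw [List.range_succ, List.foldl_append, hsa]; rfl
    have hstepB : (cs.take (i + 1)).foldl (stepB k) (PySem.Dict.empty.insert 0 1, 0, 0)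
        = stepB k (d, pr, ab) (cs.getD i ' ') := by
      rw [List.take_add_one, List.getElem?_eq_getElem hilt, Option.toList_some,
        List.foldl_append, hsb]
      simp [List.getD, List.getElem?_eq_getElem hilt]
    -- the new counts after the `if s[right] == "1"` update
    have hone := ones_succ cs hilt
    set ch := cs.getD i ' ' with hch
    set nc1 : Int := if ch = '1' then c1 + 1 else c1 with hnc1
    set nc2 : Int := if ch = '1' then c2 + 1 else c2 with hnc2
    have hδ : (ones cs (i + 1) : Int) = ones cs i + (if ch = '1' then 1 else 0) := by
      rw [hone]; split <;> simp
    have hnc1v : nc1 = (ones cs (i + 1) : Int) - ones cs l1 := by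
      have hd := hδ
      rcases eq_or_ne ch '1' with h | h
      · rw [if_pos h] at hd; rw [hnc1, if_pos h]; omega
      · rw [if_neg h] at hd; rw [hnc1, if_neg h]; omega
    have hnc2v : nc2 = (ones cs (i + 1) : Int) - ones cs l2 := by
      have hd := hδ
      rcases eq_or_ne ch '1' with h | h
      · rw [if_pos h] at hd; rw [hnc2, if_pos h]; omega
      · rw [if_neg h] at hd; rw [hnc2, if_neg h]; omega
    have hmono1 : ∀ l < l1, (ones cs (i + 1) : Int) - ones cs l > k := by
      intro l hl
      have := hM1 l hl
      have := ones_mono cs (Nat.le_succ i)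
      omega
    have hmono2 : ∀ l < l2, (ones cs (i + 1) : Int) - ones cs l > k - 1 := by
      intro l hl
      have := hM2 l hl
      have := ones_mono cs (Nat.le_succ i)
      omega
    have hW1 := shrink_spec cs i hilt k l1 nc1 (by omega) hnc1v hmono1
    have hW2 := shrink_spec cs i hilt (k - 1) l2 nc2 (by omega) hnc2v hmono2
    have hprnew : (if ch = '1' then pr + 1 else pr) = (ones cs (i + 1) : Int) := by
      have hd := hδ
      rcases eq_or_ne ch '1' with h | h
      · rw [if_pos h] at hd ⊢; omega
      · rw [if_neg h] at hd ⊢; omega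
    have hEC := exact_count cs i k hW1 hW2
    refine ⟨?_, ?_, ?_, ?_, ?_⟩
    · rw [hstepA]; simpa only [stepA] using hW1
    · rw [hstepA]; simpa only [stepA] using hW2
    · rw [hstepB]; simpa only [stepB] using hprnew
    · intro c
      rw [hstepB]
      simp only [stepB]
      rw [hprnew, PySem.Dict.getD_insert]
      simp only [cntEq]
      rcases eq_or_ne c ((ones cs (i + 1) : Int)) with h | h
      · rw [if_pos h, if_pos h.symm, hdict, h]
      · rw [if_neg h, if_neg (fun hx => h hx.symm), hdict]
        omega
    · rw [hstepA, hstepB]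
      simp only [stepA, stepB]
      rw [← hch, ← hnc1, ← hnc2, hprnew, hdict]
      have := hW1.1
      have := hW2.1
      omega

-- ===== VERDICT (by name: the statement is the Claim_ definition above) =====
theorem BinarySubstring_spec : Claim_equal_BinarySubstring := by
  intro k s _
  unfold Spec_BinarySubstring BinarySubstring BinarySubstring_alt
  have h := (main_inv s.toList k s.toList.length le_rfl).2.2.2.2
  rw [List.take_length] at h
  simpa using h
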